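-- pv_equiv track=rewrite | github.com/kalinochkind/automata | regularize.py | is_star_atomic
-- ===== SOURCE A (Python) =====
-- def is_star_atomic(r):
--     c = 0
--     f = False
--     for i in r:
--         if f and c == 0:
--             return False
--         f = True
--         if i == '(':
--             c += 1
--         elif i == ')':
--             c -= 1
--     return True
-- ===== SOURCE B (Python) =====
-- def is_star_atomic(r):
--     return all(r[:i].count('(') != r[:i].count(')') for i in range(1, len(r)))
-- ===== Notes on version B (the rewrite author's own statement) =====
-- stated objective: simpler
-- what changed: Replaces A's fused single pass with a running depth counter, early return and first-iteration flag by a one-line brute-force check that every proper non-empty prefix has unequal counts of opening and closing parentheses, using str.count on each prefix.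
import Mathlib
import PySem

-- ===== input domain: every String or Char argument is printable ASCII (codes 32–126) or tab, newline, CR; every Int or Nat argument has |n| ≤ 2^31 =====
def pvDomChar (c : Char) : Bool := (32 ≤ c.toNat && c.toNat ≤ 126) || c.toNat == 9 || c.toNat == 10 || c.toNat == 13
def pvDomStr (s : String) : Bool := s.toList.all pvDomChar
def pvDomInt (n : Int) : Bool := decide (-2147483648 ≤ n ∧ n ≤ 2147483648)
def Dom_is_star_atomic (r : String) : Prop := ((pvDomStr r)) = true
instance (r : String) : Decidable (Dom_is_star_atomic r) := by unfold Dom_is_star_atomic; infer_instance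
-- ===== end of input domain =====

-- B replaces A's fused counter loop by a brute-force check over all proper prefixes
-- (str.count on each prefix); simpler one-liner, not faster (O(n^2) vs O(n)).
-- ===== PORT A =====
def pvALoop : List Char → Int → Bool → Bool
  | [], _, _ => true
  | i :: rest, c, f =>
    if f && c == 0 then false
    else pvALoop rest (if i = '(' then c + 1 else if i = ')' then c - 1 else c) true

def is_star_atomic (r : String) : Bool := pvALoop r.toList 0 false

-- ===== PORT B =====
def is_star_atomic_alt (r : String) : Bool :=
  (PySem.List.pyRange 1 (PySem.Str.len r) 1).all
    (fun i => PySem.Str.count (PySem.Str.slice r none (some i)) "(" !=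
              PySem.Str.count (PySem.Str.slice r none (some i)) ")")

-- ===== PRECONDITION & SPEC =====
def Spec_is_star_atomic (r : String) (out : Bool) : Prop := out = is_star_atomic_alt r
instance (r : String) (out : Bool) : Decidable (Spec_is_star_atomic r out) := by unfold Spec_is_star_atomic; infer_instance

-- ===== CLAIM =====
def Claim_equal_is_star_atomic : Prop := ∀ (r : String), Dom_is_star_atomic r → Spec_is_star_atomic r (is_star_atomic r)

-- ===== LEMMAS AND PROOFS =====

-- delta of one char and depth of a prefix (proof-side only)
def pvDelta (c : Char) : Int := if c = '(' then 1 else if c = ')' then -1 else 0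

def pvD : List Char → Int
  | [] => 0
  | c :: t => pvDelta c + pvD t

-- single-character substring count is List.count (specific bridge for this file)
theorem pvCount_go_single (c : Char) :
    ∀ (l : List Char) (fuel acc : Nat), l.length ≤ fuel →
      PySem.Chars.count.go [c] fuel l acc = acc + l.count c := by
  intro l
  induction l with
  | nil => intro fuel acc _; cases fuel <;> simp [PySem.Chars.count.go]
  | cons h t ih =>
    intro fuel acc hf
    cases fuel with
    | zero => simp at hf
    | succ n =>
      simp only [PySem.Chars.count.go, List.isPrefixOf]
      by_cases hc : h = c
      · simp only [hc, beq_self_eq_true, Bool.true_and]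
        rw [show ([c] : List Char).length = 1 from rfl, List.drop_one, List.tail_cons,
          ih n (acc + 1) (by simpa using hf)]
        simp; omega
      · have : (c == h) = false := by simp [Ne.symm hc]
        simp only [this, Bool.false_and, Bool.false_eq_true, reduceIte]
        rw [ih n acc (by simpa using hf)]
        simp [List.count_cons, hc]

theorem pvCount_single (l : List Char) (c : Char) :
    PySem.Chars.count l [c] = l.count c := by
  simpa [PySem.Chars.count] using pvCount_go_single c l l.length 0 le_rfl

theorem pvD_eq_counts (l : List Char) :
    pvD l = (l.count '(' : Int) - (l.count ')' : Int) := by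
  induction l with
  | nil => simp [pvD]
  | cons h t ih =>
    simp only [pvD, pvDelta, ih, List.count_cons]
    by_cases h1 : h = '(' <;> by_cases h2 : h = ')' <;> simp_all <;> ring

theorem pvALoop_true_iff (l : List Char) (c : Int) :
    pvALoop l c true = true ↔ ∀ j, j < l.length → c + pvD (l.take j) ≠ 0 := by
  induction l generalizing c with
  | nil => simp [pvALoop]
  | cons i rest ih =>
    by_cases hc : c = 0
    · subst hc
      simp only [pvALoop, beq_self_eq_true, Bool.and_true]
      constructor
      · intro h; exact absurd h (by simp)
      · intro h
        exact absurd (h 0 (by simp)) (by simp [pvD])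
    · have hcb : (c == 0) = false := by simp [hc]
      simp only [pvALoop, hcb, Bool.and_false, Bool.false_eq_true, reduceIte]
      have hupd : (if i = '(' then c + 1 else if i = ')' then c - 1 else c) = c + pvDelta i := by
        unfold pvDelta; split_ifs <;> ring
      rw [ih]
      constructor
      · intro h j hj
        cases j with
        | zero => simpa [pvD] using hc
        | succ j' =>
          have := h j' (by simpa using hj)
          simpa [pvD, hupd, add_assoc] using this
      · intro h j hj
        have := h (j + 1) (by simpa using hj)
        simpa [pvD, hupd, add_assoc] using this

-- ===== VERDICT =====
theorem is_star_atomic_spec : Claim_equal_is_star_atomic := by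
  intro r _
  unfold Spec_is_star_atomic is_star_atomic is_star_atomic_alt
  rw [Bool.eq_iff_iff]
  have hB : ((PySem.List.pyRange 1 (PySem.Str.len r) 1).all
      (fun i => PySem.Str.count (PySem.Str.slice r none (some i)) "(" !=
                PySem.Str.count (PySem.Str.slice r none (some i)) ")")) = true ↔
      ∀ i : Int, 1 ≤ i → i < (r.toList.length : Int) →
        (r.toList.take i.toNat).count '(' ≠ (r.toList.take i.toNat).count ')' := by
    rw [List.all_eq_true]
    constructor
    · intro h i h1 h2
      have hm : i ∈ PySem.List.pyRange 1 (PySem.Str.len r) 1 := by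
        rw [PySem.List.mem_pyRange_one]
        constructor <;> simp_all [PySem.Str.len]
      have := h i hm
      simpa [PySem.Str.count, PySem.Str.slice, PySem.Chars.slice_eq_listSlice,
        PySem.List.slice_to r.toList (by omega : (0:Int) ≤ i), pvCount_single, bne_iff_ne] using this
    · intro h i hm
      rw [PySem.List.mem_pyRange_one] at hm
      obtain ⟨h1, h2⟩ := hm
      have h2' : i < (r.toList.length : Int) := by simpa [PySem.Str.len] using h2
      have := h i h1 h2'
      simpa [PySem.Str.count, PySem.Str.slice, PySem.Chars.slice_eq_listSlice,
        PySem.List.slice_to r.toList (by omega : (0:Int) ≤ i), pvCount_single, bne_iff_ne] using this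
  rw [hB]
  cases hl : r.toList with
  | nil =>
    simp only [pvALoop, true_iff]
    intro j h1 h2
    simp only [List.length_nil, Nat.cast_zero] at h2
    omega
  | cons i rest =>
    simp only [pvALoop, Bool.false_and, Bool.false_eq_true, reduceIte]
    rw [pvALoop_true_iff]
    constructor
    · intro h j h1 h2
      have hj1 : 1 ≤ j.toNat := by omega
      have hj2 : j.toNat < (i :: rest).length := by simp at h2 ⊢; omega
      obtain ⟨j', rfl'⟩ : ∃ j' : Nat, j.toNat = j' + 1 := ⟨j.toNat - 1, by omega⟩
      have hdep := h j' (by simp at hj2; omega)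
      rw [rfl']
      have hne : pvDelta i + pvD (rest.take j') ≠ 0 := hdep
      have : pvD ((i :: rest).take (j' + 1)) ≠ 0 := by
        simpa [pvD] using hne
      rw [pvD_eq_counts] at this
      intro hcontra
      apply this
      omega
    · intro h j hj
      have := h (j + 1 : Nat) (by exact_mod_cast Nat.one_le_iff_ne_zero.mpr (by omega))
        (by simp; exact_mod_cast by omega)
      have h2 : ((i :: rest).take (j + 1)).count '(' ≠ ((i :: rest).take (j + 1)).count ')' := by
        simpa using this
      have h3 : pvD ((i :: rest).take (j + 1)) ≠ 0 := by
        rw [pvD_eq_counts]; intro hc; apply h2; omega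
      simpa [pvD, add_assoc] using h3
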